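-- pv_equiv track=rewrite | github.com/banboooo044/AtCoder | ABC009/test_c.py | main2
-- ===== SOURCE A (Python) =====
-- def enable(s,t,k,a):
--         t1 = list(t)
--         t1.append(a)
--         for i in range(len(t1)):
--             if s[i] != t1[i]: k -= 1
--         s2 = s[len(t1):]
--         t2 = list(s)
--         for l in t1:
--             t2.pop(t2.index(l))
--         for i in s2:
--             if i in t2:
--                 t2.pop(t2.index(i))
--         k -= len(t2)
--         return k >= 0
--
-- def main2(n,k,s):
--     ss = sorted(s)
--     t = []
--     for i in range(n):
--         for l in ss:
--             if enable(s,t,k,l):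
--                 t.append(l)
--                 ss.pop(ss.index(l))
--                 break
--     ans = "".join(t)
--
--     return ans
-- ===== SOURCE B (Python) =====
-- def main2(n, k, s):
--     # Greedy over character counts: one count table for the remaining multiset and
--     # one for the untouched suffix; feasibility is a per-character deficit sum.
--     cnt = {}
--     for ch in s:
--         cnt[ch] = cnt.get(ch, 0) + 1
--     suf = dict(cnt)
--     alphabet = sorted(cnt)
--     t = []
--     mism = 0
--     limit = min(n, len(s))
--     p = 0
--     while p < limit:
--         c0 = s[p]
--         suf[c0] -= 1
--         placed = False
--         for c in alphabet:
--             if cnt[c] == 0: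
--                 continue
--             mm = mism + (1 if c != c0 else 0)
--             cnt[c] -= 1
--             deficit = 0
--             for x in alphabet:
--                 d = cnt[x] - suf[x]
--                 if d > 0:
--                     deficit += d
--             if mm + deficit <= k:
--                 t.append(c)
--                 mism = mm
--                 placed = True
--                 break
--             cnt[c] += 1
--         if not placed:
--             break
--         p += 1
--     return "".join(t)
-- ===== Notes on version B (the rewrite author's own statement) =====
-- stated objective: faster
-- what changed: Replaces A's per-candidate full recomputation (rebuilding the remaining list and erasing matches with repeated list.index/pop scans, re-counting prefix mismatches from scratch) by a greedy over character-count tables: one count dict for the remaining multiset and one for the untouched suffix, an incrementally maintained mismatch counter, a per-character deficit sum as the feasibility test, and a scan over distinct sorted characters instead of the duplicated sorted list; …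
import Mathlib
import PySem

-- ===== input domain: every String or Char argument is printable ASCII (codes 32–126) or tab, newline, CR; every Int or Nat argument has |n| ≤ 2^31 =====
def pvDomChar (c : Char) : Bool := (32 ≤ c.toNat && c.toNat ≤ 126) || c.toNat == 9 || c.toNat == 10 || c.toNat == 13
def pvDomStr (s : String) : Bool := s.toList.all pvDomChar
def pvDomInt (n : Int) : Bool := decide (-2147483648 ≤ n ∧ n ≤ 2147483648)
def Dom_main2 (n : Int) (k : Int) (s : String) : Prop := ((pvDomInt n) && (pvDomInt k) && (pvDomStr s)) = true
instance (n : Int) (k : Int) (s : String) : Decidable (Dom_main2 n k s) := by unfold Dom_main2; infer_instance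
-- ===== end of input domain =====

-- B replaces A's per-candidate recomputation (pop/index scans over rebuilt lists) by a greedy
-- over character-count tables with an incremental mismatch counter; intended as faster
-- (timing: 3507x at n=256; A timed out at n=1024 where B returned).


-- ===== PORT A =====
-- Port of helper 'enable'.  s[i] is ported with pyGetD and t2.pop(t2.index(l)) with
-- (remove? …).getD: Python raises only when i ≥ len(s) resp. l ∉ t2, which no call
-- reachable from main2 performs (the ports are exact on every input of main2).
def enableA (s : List Char) (t : List Char) (k : Int) (a : Char) : Bool :=
  let t1 := t ++ [a]
  let k1 := (PySem.List.pyRange 0 (t1.length : Int) 1).foldl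
      (fun k i => if PySem.List.pyGetD s i ' ' ≠ PySem.List.pyGetD t1 i ' ' then k - 1 else k) k
  let s2 := PySem.List.slice s (some (t1.length : Int)) none
  let t2a := t1.foldl (fun t2 l => (PySem.List.remove? t2 l).getD t2) s
  let t2 := s2.foldl (fun t2 i => if i ∈ t2 then (PySem.List.remove? t2 i).getD t2 else t2) t2a
  let k2 := k1 - (t2.length : Int)
  decide (k2 ≥ 0)

-- 'for l in ss: if enable(...): t.append(l); ss.pop(ss.index(l)); break'
def innerA (s : List Char) (k : Int) (t : List Char) (ss : List Char) :
    List Char → List Char × List Char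
  | [] => (t, ss)
  | l :: rest =>
    if enableA s t k l then (t ++ [l], (PySem.List.remove? ss l).getD ss)
    else innerA s k t ss rest

def main2 (n : Int) (k : Int) (s : String) : String :=
  let cs := s.toList
  let ss0 := PySem.List.sorted cs (fun c => c) false
  let res := (PySem.List.pyRange 0 n 1).foldl
      (fun (st : List Char × List Char) _ => innerA cs k st.1 st.2 st.2) ([], ss0)
  String.ofList res.1

-- ===== PORT B =====
-- per-character deficit sum: how many suffix positions must change given the remaining counts
def deficitB (alphabet : List Char) (cnt suf : PySem.Dict Char Int) : Int :=
  alphabet.foldl (fun acc x =>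
    let d := cnt.getD x 0 - suf.getD x 0
    if d > 0 then acc + d else acc) 0

-- 'for c in alphabet: …' — first feasible candidate, with the updated count table
def tryPlaceB (k : Int) (alphabet : List Char) (suf : PySem.Dict Char Int) (mism : Int)
    (c0 : Char) (cnt : PySem.Dict Char Int) :
    List Char → Option (Char × PySem.Dict Char Int × Int)
  | [] => none
  | c :: rest =>
    if cnt.getD c 0 == 0 then tryPlaceB k alphabet suf mism c0 cnt rest
    else
      let mm := mism + (if c ≠ c0 then 1 else 0)
      let cnt' := cnt.insert c (cnt.getD c 0 - 1)
      if mm + deficitB alphabet cnt' suf ≤ k then some (c, cnt', mm)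
      else tryPlaceB k alphabet suf mism c0 cnt rest

-- 'while p < limit: …' — fuel = limit - p, pos = s[p:]
def loopB (k : Int) (alphabet : List Char) :
    Nat → List Char → PySem.Dict Char Int → PySem.Dict Char Int → Int → List Char → List Char
  | 0, _, _, _, _, acc => acc
  | _ + 1, [], _, _, _, acc => acc
  | fuel + 1, c0 :: rest, cnt, suf, mism, acc =>
    let suf' := suf.insert c0 (suf.getD c0 0 - 1)
    match tryPlaceB k alphabet suf' mism c0 cnt alphabet with
    | none => acc
    | some (c, cnt', mm) => loopB k alphabet fuel rest cnt' suf' mm (acc ++ [c])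

def main2_alt (n : Int) (k : Int) (s : String) : String :=
  let cs := s.toList
  let cnt := cs.foldl (fun d ch => d.insert ch (d.getD ch 0 + 1)) PySem.Dict.empty
  let alphabet := PySem.List.sorted cnt.keys (fun c => c) false
  let fuel := (min n (cs.length : Int)).toNat
  String.ofList (loopB k alphabet fuel cs cnt cnt 0 [])

-- ===== PRECONDITION & SPEC =====
def Spec_main2 (n : Int) (k : Int) (s : String) (out : String) : Prop := out = main2_alt n k s
instance (n : Int) (k : Int) (s : String) (out : String) : Decidable (Spec_main2 n k s out) := by unfold Spec_main2; infer_instance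

-- ===== CLAIM (what is proved, stated in full; the proofs are below) =====
def Claim_equal_main2 : Prop := ∀ (n : Int) (k : Int) (s : String), Dom_main2 n k s → Spec_main2 n k s (main2 n k s)

-- ===== LEMMAS AND PROOFS =====

-- Python 't2.pop(t2.index(l))' (as ported: (remove? …).getD) is erase of the first occurrence
theorem removeGetD (t2 : List Char) (l : Char) :
    (PySem.List.remove? t2 l).getD t2 = t2.erase l := by
  by_cases h : l ∈ t2
  · rw [PySem.List.remove?_eq_some_erase t2 l h]; rfl
  · rw [(PySem.List.remove?_eq_none_iff t2 l).2 h, List.erase_of_not_mem h]; rfl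

-- both removal loops of 'enable' are multiset subtraction
theorem eraseFoldM (l : List Char) : ∀ t2 : List Char,
    ((l.foldl (fun t2 i => t2.erase i) t2 : List Char) : Multiset Char)
      = (t2 : Multiset Char) - (l : Multiset Char) := by
  induction l with
  | nil => intro t2; simp
  | cons i l ih =>
    intro t2
    simp only [List.foldl_cons, ih, ← Multiset.cons_coe, Multiset.sub_cons, Multiset.coe_erase]

theorem eraseFold (t1 : List Char) (t2 : List Char) :
    ((t1.foldl (fun t2 l => (PySem.List.remove? t2 l).getD t2) t2 : List Char) : Multiset Char)
      = (t2 : Multiset Char) - (t1 : Multiset Char) := by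
  have h : (fun (t2 : List Char) (l : Char) => (PySem.List.remove? t2 l).getD t2)
      = fun t2 l => t2.erase l := by
    funext t2 l; exact removeGetD t2 l
  rw [h, eraseFoldM]

theorem guardFold (s2 : List Char) (t2 : List Char) :
    ((s2.foldl (fun t2 i => if i ∈ t2 then (PySem.List.remove? t2 i).getD t2 else t2) t2 :
        List Char) : Multiset Char)
      = (t2 : Multiset Char) - (s2 : Multiset Char) := by
  have h : (fun (t2 : List Char) (i : Char) =>
        if i ∈ t2 then (PySem.List.remove? t2 i).getD t2 else t2)
      = fun t2 i => t2.erase i := by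
    funext t2 i
    by_cases hm : i ∈ t2
    · simp [hm, removeGetD]
    · simp [hm, List.erase_of_not_mem hm]
  rw [h, eraseFoldM]

-- the mismatch-counting loop of 'enable', as a function of the prefix candidate
def mfold (cs u : List Char) (k : Int) : Int :=
  (PySem.List.pyRange 0 (u.length : Int) 1).foldl
    (fun k i => if PySem.List.pyGetD cs i ' ' ≠ PySem.List.pyGetD u i ' ' then k - 1 else k) k

theorem mfold_range (cs u : List Char) (k : Int) :
    mfold cs u k = (List.range u.length).foldl
      (fun k i => if cs.getD i ' ' ≠ u.getD i ' ' then k - 1 else k) k := by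
  unfold mfold
  rw [PySem.List.pyRange_one, List.foldl_map]
  refine PySem.List.foldl_congr_mem _ _ _ _ ?_
  intro acc i _
  simp [PySem.List.pyGetD_natCast]

theorem mfold_append (cs t : List Char) (a : Char) (k : Int) :
    mfold cs (t ++ [a]) k
      = mfold cs t k - (if cs.getD t.length ' ' ≠ a then 1 else 0) := by
  rw [mfold_range, mfold_range]
  have hlen : (t ++ [a]).length = t.length + 1 := by simp
  rw [hlen, List.range_succ, List.foldl_append]
  have hcong : (List.range t.length).foldl
      (fun k i => if cs.getD i ' ' ≠ (t ++ [a]).getD i ' ' then k - 1 else k) k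
      = (List.range t.length).foldl
      (fun k i => if cs.getD i ' ' ≠ t.getD i ' ' then k - 1 else k) k := by
    refine PySem.List.foldl_congr_mem _ _ _ _ ?_
    intro acc i hi
    rw [List.getD_append _ _ _ _ (List.mem_range.mp hi)]
  rw [hcong]
  have hlast : (t ++ [a]).getD t.length ' ' = a := by
    rw [List.getD_append_right _ _ _ _ (le_refl _)]
    simp
  simp only [List.foldl_cons, List.foldl_nil, hlast]
  split_ifs with h
  · rfl
  · exact (sub_zero _).symm

theorem enableA_eq (cs t : List Char) (k : Int) (a : Char) :
    enableA cs t k a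
      = decide (0 ≤ mfold cs (t ++ [a]) k
          - (((cs : Multiset Char) - ((t ++ [a] : List Char) : Multiset Char)
              - ((cs.drop (t.length + 1) : List Char) : Multiset Char)).card : Int)) := by
  have hs2 : PySem.List.slice cs (some (((t ++ [a]).length : Nat) : Int)) none
      = cs.drop (t.length + 1) := by
    rw [PySem.List.slice_from_natCast]; simp
  have hlen : ((cs.drop (t.length+1)).foldl
        (fun t2 i => if i ∈ t2 then (PySem.List.remove? t2 i).getD t2 else t2)
        ((t++[a]).foldl (fun t2 l => (PySem.List.remove? t2 l).getD t2) cs)).length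
      = (((cs : Multiset Char) - ((t ++ [a] : List Char) : Multiset Char)
          - ((cs.drop (t.length + 1) : List Char) : Multiset Char)).card : Nat) := by
    rw [← Multiset.coe_card, guardFold, eraseFold]
  simp only [enableA]
  rw [hs2, hlen]
  rfl

theorem card_sub_eq_sum (A : List Char) (hA : A.Nodup) (X Y : Multiset Char)
    (hX : ∀ x ∈ X, x ∈ A) :
    (((X - Y).card : Int))
      = (A.map (fun x => max 0 ((X.count x : Int) - (Y.count x : Int)))).sum := by
  have hsub : (X - Y).toFinset ⊆ A.toFinset := by
    intro x hx
    have hx1 : x ∈ X - Y := Multiset.mem_toFinset.mp hx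
    have hx2 : x ∈ X := Multiset.mem_of_le (Multiset.sub_le_self X Y) hx1
    exact List.mem_toFinset.mpr (hX x hx2)
  have h1 : (X - Y).card = ∑ a ∈ A.toFinset, (X - Y).count a := by
    rw [← Multiset.toFinset_sum_count_eq (X - Y)]
    exact (Finset.sum_subset hsub (fun x _ hx =>
      Multiset.count_eq_zero.mpr (fun h => hx (Multiset.mem_toFinset.mpr h))))
  have h2 : ∀ a, ((((X - Y).count a : Nat)) : Int)
      = max 0 ((X.count a : Int) - (Y.count a : Int)) := by
    intro a
    rw [Multiset.count_sub]
    omega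
  calc (((X - Y).card : Int))
      = ∑ a ∈ A.toFinset, (((X - Y).count a : Nat) : Int) := by rw [h1]; push_cast; rfl
    _ = ∑ a ∈ A.toFinset, max 0 ((X.count a : Int) - (Y.count a : Int)) :=
        Finset.sum_congr rfl (fun a _ => h2 a)
    _ = (A.map (fun x => max 0 ((X.count x : Int) - (Y.count x : Int)))).sum :=
        List.sum_toFinset _ hA

theorem deficitB_fold (A : List Char) (g : Char → Int) : ∀ acc : Int,
    A.foldl (fun acc x => let d := g x; if d > 0 then acc + d else acc) acc
      = acc + (A.map (fun x => max 0 (g x))).sum := by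
  induction A with
  | nil => intro acc; simp
  | cons x xs ih =>
    intro acc
    simp only [List.foldl_cons, List.map_cons, List.sum_cons, ih]
    by_cases h : g x > 0
    · simp [h, max_eq_right (le_of_lt h)]; ring
    · have hm : max 0 (g x) = 0 := max_eq_left (by omega)
      simp [h, hm]

theorem deficitB_eq (A : List Char) (cnt suf : PySem.Dict Char Int) :
    deficitB A cnt suf = (A.map (fun x => max 0 (cnt.getD x 0 - suf.getD x 0))).sum := by
  have h := deficitB_fold A (fun x => cnt.getD x 0 - suf.getD x 0) 0
  simpa [deficitB] using h

theorem find?_sorted_eq_some_iff (l : List Char) (hl : l.Pairwise (· ≤ ·))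
    (p : Char → Bool) (v : Char) :
    l.find? p = some v ↔ (v ∈ l ∧ p v = true ∧ ∀ u ∈ l, p u = true → v ≤ u) := by
  induction l with
  | nil => simp
  | cons x xs ih =>
    rcases List.pairwise_cons.mp hl with ⟨hx, hxs⟩
    by_cases hp : p x
    · simp only [List.find?_cons, hp]
      constructor
      · rintro h
        have hv : x = v := by simpa using h
        subst hv
        refine ⟨List.mem_cons_self .., hp, ?_⟩
        intro u hu _
        rcases List.mem_cons.mp hu with h1 | h1
        · exact le_of_eq h1.symm
        · exact hx u h1
      · rintro ⟨hv, hpv, hmin⟩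
        have h1 : v ≤ x := hmin x (List.mem_cons_self ..) hp
        rcases List.mem_cons.mp hv with h2 | h2
        · simp [h2]
        · have h3 := hx v h2
          have h4 : v = x := le_antisymm h1 h3
          simp [h4]
    · simp only [List.find?_cons, hp]
      rw [ih hxs]
      constructor
      · rintro ⟨hv, hpv, hmin⟩
        refine ⟨List.mem_cons_of_mem _ hv, hpv, ?_⟩
        intro u hu hpu
        rcases List.mem_cons.mp hu with h1 | h1
        · subst h1; exact absurd hpu (by simp [hp])
        · exact hmin u h1 hpu
      · rintro ⟨hv, hpv, hmin⟩
        rcases List.mem_cons.mp hv with h1 | h1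
        · subst h1; exact absurd hpv (by simp [hp])
        · exact ⟨h1, hpv, fun u hu hpu => hmin u (List.mem_cons_of_mem _ hu) hpu⟩

theorem find?_sorted_congr (l1 l2 : List Char) (p1 p2 : Char → Bool)
    (h1 : l1.Pairwise (· ≤ ·)) (h2 : l2.Pairwise (· ≤ ·))
    (hmem : ∀ c, (c ∈ l1 ∧ p1 c = true) ↔ (c ∈ l2 ∧ p2 c = true)) :
    l1.find? p1 = l2.find? p2 := by
  cases hf : l1.find? p1 with
  | none =>
    symm
    rw [List.find?_eq_none] at hf ⊢
    intro x hx hpx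
    exact hf x ((hmem x).mpr ⟨hx, hpx⟩).1 ((hmem x).mpr ⟨hx, hpx⟩).2
  | some v =>
    symm
    rcases (find?_sorted_eq_some_iff l1 h1 p1 v).mp hf with ⟨hv, hpv, hmin⟩
    rw [find?_sorted_eq_some_iff l2 h2 p2 v]
    rcases (hmem v).mp ⟨hv, hpv⟩ with ⟨hv2, hpv2⟩
    refine ⟨hv2, hpv2, ?_⟩
    intro u hu hpu
    rcases (hmem u).mpr ⟨hu, hpu⟩ with ⟨hu1, hpu1⟩
    exact hmin u hu1 hpu1

theorem innerA_as_find? (cs : List Char) (k : Int) (t ss : List Char) : ∀ cur : List Char,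
    innerA cs k t ss cur
      = match cur.find? (fun c => enableA cs t k c) with
        | some l => (t ++ [l], (PySem.List.remove? ss l).getD ss)
        | none => (t, ss) := by
  intro cur
  induction cur with
  | nil => rfl
  | cons l rest ih =>
    simp only [innerA, List.find?_cons]
    by_cases h : enableA cs t k l
    · simp [h]
    · simp [h, ih]

theorem tryPlaceB_as_find? (k : Int) (alpha : List Char) (suf : PySem.Dict Char Int)
    (mism : Int) (c0 : Char) (cnt : PySem.Dict Char Int) : ∀ cur : List Char,
    tryPlaceB k alpha suf mism c0 cnt cur
      = (cur.find? (fun c => (!(cnt.getD c 0 == 0)) &&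
            decide (mism + (if c ≠ c0 then 1 else 0)
              + deficitB alpha (cnt.insert c (cnt.getD c 0 - 1)) suf ≤ k))).map
          (fun c => (c, cnt.insert c (cnt.getD c 0 - 1), mism + (if c ≠ c0 then 1 else 0))) := by
  intro cur
  induction cur with
  | nil => rfl
  | cons c rest ih =>
    simp only [tryPlaceB, List.find?_cons]
    by_cases h0 : cnt.getD c 0 == 0
    · simp [h0, ih]
    · by_cases ht : (mism + if c = c0 then 0 else 1)
          + deficitB alpha (cnt.insert c (cnt.getD c 0 - 1)) suf ≤ k
      · simp [h0, ht]
      · simp [h0, ht, ih]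

-- a foldl that ignores the list elements is function iteration
theorem foldl_const_iterate {σ α : Type} (f : σ → σ) : ∀ (l : List α) (init : σ),
    l.foldl (fun st _ => f st) init = f^[l.length] init := by
  intro l
  induction l with
  | nil => intro init; rfl
  | cons x xs ih => intro init; simp [List.foldl_cons, ih, Function.iterate_succ_apply]

-- alphabet facts
theorem alpha_nodup (cs : List Char) :
    (PySem.List.sorted (PySem.Set.ofList cs) (fun c => c) false).Nodup :=
  (PySem.List.sorted_ofList_pairwise_lt cs).imp ne_of_lt

theorem alpha_pairwise_le (cs : List Char) :
    (PySem.List.sorted (PySem.Set.ofList cs) (fun c => c) false).Pairwise (· ≤ ·) :=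
  (PySem.List.sorted_ofList_pairwise_lt cs).imp le_of_lt

theorem mem_alpha (cs : List Char) (x : Char) :
    x ∈ PySem.List.sorted (PySem.Set.ofList cs) (fun c => c) false ↔ x ∈ cs := by
  rw [PySem.List.mem_sorted, PySem.Set.mem_ofList]

-- the feasibility test of A ('enable') equals B's count-table test, per candidate
theorem candidate_iff (cs t ss : List Char) (k mism : Int)
    (cnt suf' : PySem.Dict Char Int)
    (hss : (ss : Multiset Char) = (cs : Multiset Char) - (t : Multiset Char))
    (hcnt : ∀ x, cnt.getD x 0 = (ss.count x : Int))
    (hsuf : ∀ x, suf'.getD x 0 = ((cs.drop (t.length + 1)).count x : Int))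
    (hmf : mfold cs t k = k - mism)
    (hp : t.length < cs.length) (c : Char) (hcmem : c ∈ ss) :
    enableA cs t k c
      = decide (mism + (if c ≠ cs[t.length] then 1 else 0)
          + deficitB (PySem.List.sorted (PySem.Set.ofList cs) (fun c => c) false)
              (cnt.insert c (cnt.getD c 0 - 1)) suf' ≤ k) := by
  have hcpos : 0 < ss.count c := List.count_pos_iff.mpr hcmem
  have hX : ((cs : Multiset Char) - ((t ++ [c] : List Char) : Multiset Char))
      = ((ss.erase c : List Char) : Multiset Char) := by
    have h1 : ((t ++ [c] : List Char) : Multiset Char)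
        = (t : Multiset Char) + ([c] : List Char) := by
      exact_mod_cast (Multiset.coe_add t [c]).symm
    rw [h1, tsub_add_eq_tsub_tsub, ← hss]
    have h2 : (([c] : List Char) : Multiset Char) = ({c} : Multiset Char) := rfl
    rw [h2, Multiset.sub_singleton, Multiset.coe_erase]
  have hXsup : ∀ x ∈ ((cs : Multiset Char) - ((t ++ [c] : List Char) : Multiset Char)),
      x ∈ PySem.List.sorted (PySem.Set.ofList cs) (fun c => c) false := by
    intro x hx
    rw [hX] at hx
    have hx1 : x ∈ ss := List.mem_of_mem_erase (by exact_mod_cast hx)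
    have hx2 : 0 < ss.count x := List.count_pos_iff.mpr hx1
    rw [show ss.count x = Multiset.count x (ss : Multiset Char) from
      (Multiset.coe_count x ss).symm, hss, Multiset.count_sub] at hx2
    have hx3 : 0 < Multiset.count x (cs : Multiset Char) := by omega
    rw [mem_alpha]
    exact List.count_pos_iff.mp (by rwa [Multiset.coe_count] at hx3)
  rw [enableA_eq, mfold_append, hmf,
    card_sub_eq_sum _ (alpha_nodup cs) _ _ hXsup, deficitB_eq]
  have hterm : (fun x => max 0 ((cnt.insert c (cnt.getD c 0 - 1)).getD x 0 - suf'.getD x 0))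
      = fun x => max 0
          ((Multiset.count x ((cs : Multiset Char) - ((t ++ [c] : List Char) : Multiset Char)) : Int)
            - (Multiset.count x ((cs.drop (t.length + 1) : List Char) : Multiset Char) : Int)) := by
    funext x
    rw [hX, Multiset.coe_count, Multiset.coe_count, hsuf x,
      PySem.Dict.getD_insert, hcnt c, List.count_erase]
    by_cases hxc : x = c
    · subst hxc
      simp only [beq_self_eq_true, if_pos]

      congr 1
      omega
    · rw [if_neg hxc, hcnt x, if_neg (by simpa using (Ne.symm hxc) : ¬(c == x) = true)]
      simp
  rw [hterm]
  rw [List.getD_eq_getElem cs ' ' hp]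
  rw [decide_eq_decide]
  have hne : (if cs[t.length] ≠ c then (1:Int) else 0) = (if c ≠ cs[t.length] then 1 else 0) := by
    by_cases h : c = cs[t.length] <;> simp [h, Ne, eq_comm]
  rw [hne]
  constructor <;> intro h <;> linarith

-- the multiset of 'list(s) minus t1' is the remaining pool minus the candidate
theorem sub_append_singleton (cs t ss : List Char) (c : Char)
    (hss : (ss : Multiset Char) = (cs : Multiset Char) - (t : Multiset Char)) :
    ((cs : Multiset Char) - ((t ++ [c] : List Char) : Multiset Char))
      = ((ss.erase c : List Char) : Multiset Char) := by
  have h1 : ((t ++ [c] : List Char) : Multiset Char)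
      = (t : Multiset Char) + ([c] : List Char) := by
    exact_mod_cast (Multiset.coe_add t [c]).symm
  rw [h1, tsub_add_eq_tsub_tsub, ← hss]
  have h2 : (([c] : List Char) : Multiset Char) = ({c} : Multiset Char) := rfl
  rw [h2, Multiset.sub_singleton, Multiset.coe_erase]

theorem count_ss_eq (cs t ss : List Char)
    (hss : (ss : Multiset Char) = (cs : Multiset Char) - (t : Multiset Char)) (x : Char) :
    ss.count x = cs.count x - t.count x := by
  have h := congrArg (Multiset.count x) hss
  rwa [Multiset.coe_count, Multiset.count_sub, Multiset.coe_count, Multiset.coe_count] at h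

-- MAIN LOOP INVARIANT: A's n-fold scan over the sorted pool computes B's count-table loop
theorem loop_eq (cs : List Char) (k : Int) (alpha : List Char)
    (halpha : alpha = PySem.List.sorted (PySem.Set.ofList cs) (fun c => c) false) :
    ∀ (fA : Nat) (t ss : List Char) (cnt suf : PySem.Dict Char Int) (mism : Int),
    ((ss : Multiset Char) = (cs : Multiset Char) - (t : Multiset Char)) →
    ((t : Multiset Char) ≤ (cs : Multiset Char)) →
    ss.Pairwise (· ≤ ·) →
    (∀ x, cnt.getD x 0 = (ss.count x : Int)) →
    (∀ x, suf.getD x 0 = ((cs.drop t.length).count x : Int)) →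
    (mfold cs t k = k - mism) →
    ((fun st : List Char × List Char => innerA cs k st.1 st.2 st.2)^[fA] (t, ss)).1
      = loopB k alpha (min fA (cs.length - t.length)) (cs.drop t.length) cnt suf mism t := by
  subst halpha
  intro fA
  induction fA with
  | zero =>
    intro t ss cnt suf mism hss hts hsorted hcnt hsuf hmf
    rw [Nat.zero_min]
    rfl
  | succ fA ih =>
    intro t ss cnt suf mism hss hts hsorted hcnt hsuf hmf
    have htlen : t.length ≤ cs.length := by
      have h := Multiset.card_le_card hts
      simpa [Multiset.coe_card] using h
    have hsslen : ss.length = cs.length - t.length := by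
      have h1 : (ss : Multiset Char).card
          = ((cs : Multiset Char) - (t : Multiset Char)).card := by rw [hss]
      rw [Multiset.card_sub hts] at h1
      simpa [Multiset.coe_card] using h1
    by_cases hplen : t.length < cs.length
    · -- a position remains: one placement attempt on both sides
      have hdrop : cs.drop t.length = cs[t.length] :: cs.drop (t.length+1) :=
        List.drop_eq_getElem_cons hplen
      have hmin : min (fA+1) (cs.length - t.length)
          = (min fA (cs.length - (t.length+1))) + 1 := by omega
      rw [hmin, hdrop]
      set c0 := cs[t.length] with hc0
      set suf' := suf.insert c0 (suf.getD c0 0 - 1) with hsufdef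
      have hsuf' : ∀ x, suf'.getD x 0 = ((cs.drop (t.length+1)).count x : Int) := by
        intro x
        have hx0 := hsuf x
        rw [hdrop, List.count_cons] at hx0
        rw [hsufdef, PySem.Dict.getD_insert]
        by_cases hxc : x = c0
        · subst hxc
          rw [if_pos rfl, hsuf c0, hdrop, List.count_cons]
          simp
        · rw [if_neg hxc, hx0,
            if_neg (show ¬(c0 == x) = true by simpa using Ne.symm hxc)]
          push_cast
          ring
      set p2 : Char → Bool := fun c => (!(cnt.getD c 0 == 0)) &&
          decide (mism + (if c ≠ c0 then 1 else 0)
            + deficitB (PySem.List.sorted (PySem.Set.ofList cs) (fun c => c) false)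
                (cnt.insert c (cnt.getD c 0 - 1)) suf' ≤ k) with hp2
      have hmem_iff : ∀ c, (c ∈ ss ∧ enableA cs t k c = true)
          ↔ (c ∈ PySem.List.sorted (PySem.Set.ofList cs) (fun c => c) false ∧ p2 c = true) := by
        intro c
        constructor
        · rintro ⟨hcm, hen⟩
          have hcc := count_ss_eq cs t ss hss c
          have hcpos : 0 < ss.count c := List.count_pos_iff.mpr hcm
          have hmemcs : c ∈ cs := List.count_pos_iff.mp (by omega)
          refine ⟨(mem_alpha cs c).mpr hmemcs, ?_⟩
          rw [hp2]
          simp only [Bool.and_eq_true, Bool.not_eq_eq_eq_not, Bool.not_true, beq_eq_false_iff_ne]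
          constructor
          · rw [hcnt c]
            exact_mod_cast (by omega : (ss.count c : Int) ≠ 0)
          · rw [← candidate_iff cs t ss k mism cnt suf' hss hcnt hsuf' hmf hplen c hcm]
            exact hen
        · rintro ⟨hca, hpc⟩
          rw [hp2] at hpc
          simp only [Bool.and_eq_true, Bool.not_eq_eq_eq_not, Bool.not_true,
            beq_eq_false_iff_ne] at hpc
          have hcm : c ∈ ss := by
            rcases hpc with ⟨h0, _⟩
            rw [hcnt c] at h0
            have : ss.count c ≠ 0 := by exact_mod_cast h0
            exact List.count_pos_iff.mp (by omega)
          refine ⟨hcm, ?_⟩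
          rw [candidate_iff cs t ss k mism cnt suf' hss hcnt hsuf' hmf hplen c hcm]
          exact hpc.2
      have hfind : ss.find? (fun c => enableA cs t k c)
          = (PySem.List.sorted (PySem.Set.ofList cs) (fun c => c) false).find? p2 :=
        find?_sorted_congr _ _ _ _ hsorted (alpha_pairwise_le cs) hmem_iff
      rw [Function.iterate_succ_apply]
      cases hf : (PySem.List.sorted (PySem.Set.ofList cs) (fun c => c) false).find? p2 with
      | none =>
        have hinner : innerA cs k (t, ss).1 (t, ss).2 (t, ss).2 = (t, ss) := by
          show innerA cs k t ss ss = (t, ss)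
          rw [innerA_as_find?, hfind, hf]
        rw [hinner, Function.iterate_fixed hinner fA]
        simp only [loopB, tryPlaceB_as_find?, ← hsufdef, ← hp2, hf, Option.map_none]
      | some c =>
        have hcm : c ∈ ss := List.mem_of_find?_eq_some (by rw [hfind, hf])
        have hen : enableA cs t k c = true := List.find?_some (p := fun c => enableA cs t k c)
          (by rw [hfind, hf])
        have hinner : innerA cs k (t, ss).1 (t, ss).2 (t, ss).2 = (t ++ [c], ss.erase c) := by
          show innerA cs k t ss ss = (t ++ [c], ss.erase c)
          rw [innerA_as_find?, hfind, hf]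
          simp only [removeGetD]
        rw [hinner]
        -- B side: one loopB step
        have hB : loopB k (PySem.List.sorted (PySem.Set.ofList cs) (fun c => c) false)
              ((min fA (cs.length - (t.length+1))) + 1) (c0 :: cs.drop (t.length+1))
              cnt suf mism t
            = loopB k (PySem.List.sorted (PySem.Set.ofList cs) (fun c => c) false)
              (min fA (cs.length - (t.length+1))) (cs.drop (t.length+1))
              (cnt.insert c (cnt.getD c 0 - 1)) suf'
              (mism + (if c ≠ c0 then 1 else 0)) (t ++ [c]) := by
          simp only [loopB, tryPlaceB_as_find?, ← hsufdef, ← hp2, hf, Option.map_some]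
        rw [hB]
        -- invariants at the next position
        have hcc := count_ss_eq cs t ss hss c
        have hcpos : 0 < ss.count c := List.count_pos_iff.mpr hcm
        have hss' : ((ss.erase c : List Char) : Multiset Char)
            = (cs : Multiset Char) - ((t ++ [c] : List Char) : Multiset Char) :=
          (sub_append_singleton cs t ss c hss).symm
        have hts' : ((t ++ [c] : List Char) : Multiset Char) ≤ (cs : Multiset Char) := by
          rw [Multiset.le_iff_count]
          intro a
          rw [Multiset.coe_count, Multiset.coe_count, List.count_append]
          have ha := count_ss_eq cs t ss hss a
          have hta : t.count a ≤ cs.count a := by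
            have h := Multiset.le_iff_count.mp hts a
            rwa [Multiset.coe_count, Multiset.coe_count] at h
          by_cases hac : a = c
          · subst hac
            simp only [List.count_singleton]
            simp only [beq_self_eq_true, if_pos]
            omega
          · rw [List.count_singleton,
              if_neg (show ¬(c == a) = true by simpa using Ne.symm hac)]
            omega
        have hsorted' : (ss.erase c).Pairwise (· ≤ ·) :=
          List.Pairwise.sublist List.erase_sublist hsorted
        have hcnt' : ∀ x, (cnt.insert c (cnt.getD c 0 - 1)).getD x 0
            = ((ss.erase c).count x : Int) := by
          intro x
          rw [PySem.Dict.getD_insert, List.count_erase]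
          by_cases hxc : x = c
          · subst hxc
            rw [if_pos rfl, hcnt x]
            simp only [beq_self_eq_true, if_pos]
            omega
          · rw [if_neg hxc, hcnt x, if_neg (by simpa using Ne.symm hxc : ¬(c == x) = true)]
            simp
        have hsuf'' : ∀ x, suf'.getD x 0 = ((cs.drop (t ++ [c]).length).count x : Int) := by
          intro x
          rw [List.length_append, List.length_singleton]
          exact hsuf' x
        have hmf' : mfold cs (t ++ [c]) k
            = k - (mism + (if c ≠ c0 then 1 else 0)) := by
          rw [mfold_append, hmf, List.getD_eq_getElem cs ' ' hplen, ← hc0]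
          have hne : (if c0 ≠ c then (1:Int) else 0) = (if c ≠ c0 then 1 else 0) := by
            by_cases h : c = c0 <;> simp [h, Ne, eq_comm]
          rw [hne]
          ring
        have := ih (t ++ [c]) (ss.erase c) (cnt.insert c (cnt.getD c 0 - 1)) suf'
          (mism + (if c ≠ c0 then 1 else 0)) hss' hts' hsorted' hcnt' hsuf'' hmf'
        rwa [List.length_append, List.length_singleton] at this
    · -- the pool is empty: both sides stop
      have hssnil : ss = [] := List.length_eq_zero_iff.mp (by omega)
      have hmin : min (fA+1) (cs.length - t.length) = 0 := by omega
      have hdrop : cs.drop t.length = [] := List.drop_eq_nil_of_le (by omega)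
      rw [hmin, hdrop]
      have hfix : (fun st : List Char × List Char => innerA cs k st.1 st.2 st.2) (t, ss)
          = (t, ss) := by subst hssnil; rfl
      rw [Function.iterate_fixed hfix]
      rfl

-- ===== VERDICT (by name: the statement is the Claim_ definition above) =====
theorem main2_spec : Claim_equal_main2 := by
  unfold Claim_equal_main2
  intro n k s _
  unfold Spec_main2
  simp only [main2, main2_alt]
  set cs := s.toList with hcs
  set cnt0 : PySem.Dict Char Int :=
    cs.foldl (fun d ch => d.insert ch (d.getD ch 0 + 1)) PySem.Dict.empty with hcnt0
  have hcounter : cnt0 = PySem.Dict.counter cs := by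
    rw [hcnt0, PySem.Dict.foldl_insert_getD_add_one_eq_counter]
  have halpha : PySem.List.sorted cnt0.keys (fun c => c) false
      = PySem.List.sorted (PySem.Set.ofList cs) (fun c => c) false := by
    rw [hcounter, PySem.Dict.keys_counter]
  have hfold : (PySem.List.pyRange 0 n 1).foldl
      (fun (st : List Char × List Char) _ => innerA cs k st.1 st.2 st.2)
      ([], PySem.List.sorted cs (fun c => c) false)
      = (fun st : List Char × List Char => innerA cs k st.1 st.2 st.2)^[n.toNat]
        ([], PySem.List.sorted cs (fun c => c) false) := by
    rw [foldl_const_iterate (fun st : List Char × List Char => innerA cs k st.1 st.2 st.2)]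
    rw [PySem.List.length_pyRange_one]
    norm_num
  have hperm : (PySem.List.sorted cs (fun c => c) false).Perm cs :=
    PySem.List.sorted_perm cs (fun c => c) false
  have h1 : ((PySem.List.sorted cs (fun c => c) false : List Char) : Multiset Char)
      = (cs : Multiset Char) - (([] : List Char) : Multiset Char) := by
    have := Multiset.coe_eq_coe.mpr hperm
    simpa using this
  have h2 : (([] : List Char) : Multiset Char) ≤ (cs : Multiset Char) := by
    simp
  have h3 : (PySem.List.sorted cs (fun c => c) false).Pairwise (· ≤ ·) := by
    simpa using PySem.List.sorted_pairwise cs (fun c => c)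
  have h4 : ∀ x, cnt0.getD x 0
      = ((PySem.List.sorted cs (fun c => c) false).count x : Int) := by
    intro x
    rw [hcounter, PySem.Dict.getD_counter, hperm.count_eq x]
  have h5 : ∀ x, cnt0.getD x 0
      = ((cs.drop (([] : List Char)).length).count x : Int) := by
    intro x
    rw [hcounter, PySem.Dict.getD_counter]
    simp
  have h6 : mfold cs ([] : List Char) k = k - 0 := by
    rw [mfold_range]
    simp
  have key := loop_eq cs k (PySem.List.sorted (PySem.Set.ofList cs) (fun c => c) false) rfl
    n.toNat [] (PySem.List.sorted cs (fun c => c) false) cnt0 cnt0 0 h1 h2 h3 h4 h5 h6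
  have hfuel : (min n ((cs.length : Nat) : Int)).toNat
      = min n.toNat (cs.length - ([] : List Char).length) := by
    rcases le_total n ((cs.length : Nat) : Int) with h | h
    · rw [min_eq_left h]; simp; omega
    · rw [min_eq_right h]; simp; omega
  rw [hfold, halpha, hfuel]
  rw [key]
  simp
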